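-- pv_equiv track=rewrite | github.com/drhenderson89/pythonAgents | core/loop.py | _has_unresolved_tool_error
-- ===== SOURCE A (Python) =====
-- from typing import Any, Callable, Dict, List
--
-- def _has_unresolved_tool_error(tool_trace: List[Dict[str, Any]]) -> bool:
--     """Return True when the latest tool status is an error without later success."""
--     # A final response is not considered safe if the last error happens after
--     # the last success in the tool trace.
--     last_error_index = -1
--     last_success_index = -1
--     for index, entry in enumerate(tool_trace):
--         status_value = entry.get("status")
--         if status_value == "error":
--             last_error_index = index
--         elif status_value == "success":
--             last_success_index = index
--
--     return last_error_index > last_success_index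
-- ===== SOURCE B (Python) =====
-- from typing import Any, Dict, List
--
-- def _has_unresolved_tool_error(tool_trace: List[Dict[str, Any]]) -> bool:
--     """Scan the trace backwards: the first 'error'/'success' seen decides."""
--     for entry in reversed(tool_trace):
--         status_value = entry.get("status")
--         if status_value == "error":
--             return True
--         if status_value == "success":
--             return False
--     return False
-- ===== Notes on version B (the rewrite author's own statement) =====
-- stated objective: simpler
-- what changed: Replaces the full forward scan that tracks two last-seen indices with a reverse scan that early-exits at the first 'error'/'success' entry from the end.
import Mathlib
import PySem

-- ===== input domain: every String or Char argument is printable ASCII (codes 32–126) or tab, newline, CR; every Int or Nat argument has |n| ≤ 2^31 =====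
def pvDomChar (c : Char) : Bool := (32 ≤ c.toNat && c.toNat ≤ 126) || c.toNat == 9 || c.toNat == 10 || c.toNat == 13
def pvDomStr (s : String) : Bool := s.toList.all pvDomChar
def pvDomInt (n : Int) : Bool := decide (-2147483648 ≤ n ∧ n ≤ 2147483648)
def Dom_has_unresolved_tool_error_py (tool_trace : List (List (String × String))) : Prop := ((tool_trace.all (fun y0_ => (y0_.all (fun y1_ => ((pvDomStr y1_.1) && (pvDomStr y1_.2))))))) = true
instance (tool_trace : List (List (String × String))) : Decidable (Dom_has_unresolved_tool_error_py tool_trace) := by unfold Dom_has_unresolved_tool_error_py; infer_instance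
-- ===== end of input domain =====

-- B replaces A's full forward scan with two last-seen indices by a reverse scan
-- that returns at the first 'error'/'success' entry from the end (objective: simpler).

-- ===== PORT A =====
-- step of A's for-loop: update (last_error_index, last_success_index)
def pvAStep (st : Int × Int) (p : Int × List (String × String)) : Int × Int :=
  let status_value := (PySem.Dict.mk p.2).get? "status"
  if status_value == some "error" then (p.1, st.2)
  else if status_value == some "success" then (st.1, p.1)
  else st

def has_unresolved_tool_error_py (tool_trace : List (List (String × String))) : Bool :=
  let st := (PySem.List.enumerate tool_trace 0).foldl pvAStep (-1, -1)
  decide (st.1 > st.2)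

-- ===== PORT B =====
-- B's loop over reversed(tool_trace): first 'error'/'success' decides
def pvBGo : List (List (String × String)) → Bool
  | [] => false
  | entry :: rest =>
    let status_value := (PySem.Dict.mk entry).get? "status"
    if status_value == some "error" then true
    else if status_value == some "success" then false
    else pvBGo rest

def has_unresolved_tool_error_py_alt (tool_trace : List (List (String × String))) : Bool :=
  pvBGo tool_trace.reverse

-- ===== PRECONDITION & SPEC =====
def Spec_has_unresolved_tool_error_py (tool_trace : List (List (String × String))) (out : Bool) : Prop := out = has_unresolved_tool_error_py_alt tool_trace
instance (tool_trace : List (List (String × String))) (out : Bool) : Decidable (Spec_has_unresolved_tool_error_py tool_trace out) := by unfold Spec_has_unresolved_tool_error_py; infer_instance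

-- ===== CLAIM (what is proved, stated in full; the proofs are below) =====
def Claim_equal_has_unresolved_tool_error_py : Prop := ∀ (tool_trace : List (List (String × String))), Dom_has_unresolved_tool_error_py tool_trace → Spec_has_unresolved_tool_error_py tool_trace (has_unresolved_tool_error_py tool_trace)

-- ===== LEMMAS AND PROOFS =====

-- pvBGo generalized with an explicit default for the fall-through case
def pvBGoD : List (List (String × String)) → Bool → Bool
  | [], d => d
  | entry :: rest, d =>
    let status_value := (PySem.Dict.mk entry).get? "status"
    if status_value == some "error" then true
    else if status_value == some "success" then false
    else pvBGoD rest d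

-- forward accumulation of "value decided by the last relevant entry, else d"
def pvFwd : List (List (String × String)) → Bool → Bool
  | [], d => d
  | entry :: rest, d =>
    let status_value := (PySem.Dict.mk entry).get? "status"
    if status_value == some "error" then pvFwd rest true
    else if status_value == some "success" then pvFwd rest false
    else pvFwd rest d

theorem pvBGo_eq_goD (l : List (List (String × String))) : pvBGo l = pvBGoD l false := by
  induction l with
  | nil => rfl
  | cons x t ih => simp only [pvBGo, pvBGoD, ih]

theorem pvBGoD_append (u : List (List (String × String))) (x : List (String × String)) (d : Bool) :
    pvBGoD (u ++ [x]) d =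
      pvBGoD u (if (PySem.Dict.mk x).get? "status" == some "error" then true
                else if (PySem.Dict.mk x).get? "status" == some "success" then false else d) := by
  induction u with
  | nil => simp only [List.nil_append, pvBGoD]
  | cons y t ih => simp only [List.cons_append, pvBGoD, ih]

theorem pvFwd_eq_goD_reverse (l : List (List (String × String))) (d : Bool) :
    pvFwd l d = pvBGoD l.reverse d := by
  induction l generalizing d with
  | nil => rfl
  | cons x t ih =>
    simp only [pvFwd, List.reverse_cons, pvBGoD_append]
    split
    · exact ih true
    · split
      · exact ih false
      · exact ih d

theorem pvFold_eq_fwd (l : List (List (String × String))) (k e s : Int)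
    (he : e < k) (hs : s < k) :
    (decide (((PySem.List.enumerate l k).foldl pvAStep (e, s)).1 >
             ((PySem.List.enumerate l k).foldl pvAStep (e, s)).2)) =
      pvFwd l (decide (e > s)) := by
  induction l generalizing k e s with
  | nil => simp [PySem.List.enumerate_nil, pvFwd]
  | cons x t ih =>
    rw [PySem.List.enumerate_cons]
    simp only [List.foldl_cons, pvFwd, pvAStep]
    split
    · rw [ih (k + 1) k s (by omega) (by omega)]
      congr 1
      simp only [decide_eq_true_eq]
      omega
    · split
      · rw [ih (k + 1) e k (by omega) (by omega)]
        congr 1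
        simp only [decide_eq_false_iff_not]
        omega
      · exact ih (k + 1) e s (by omega) (by omega)

-- ===== VERDICT (by name: the statement is the Claim_ definition above) =====
theorem has_unresolved_tool_error_py_spec : Claim_equal_has_unresolved_tool_error_py := by
  intro tool_trace _
  unfold Spec_has_unresolved_tool_error_py has_unresolved_tool_error_py has_unresolved_tool_error_py_alt
  rw [pvBGo_eq_goD, ← pvFwd_eq_goD_reverse]
  simpa using pvFold_eq_fwd tool_trace 0 (-1) (-1) (by omega) (by omega)
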